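-- pv_equiv track=rewrite | github.com/Helmholtz-AI-Energy/special-couscous | py/utils.py | ticks
-- ===== SOURCE A (Python) =====
-- from typing import Collection, List, Optional, Tuple, Dict, Union
--
-- def ticks(
--     num_ticks: int,
--     max_ticks: int = 10,
--     include_upper: bool = False,
--     _accumulated_divisor: int = 1,
-- ) -> List[int]:
--     """
--     Generate an evenly spaced list of ticks using at most max_ticks ticks and a step-size divisible by i * 1e+j for
--     i in [1, 2, 5] and j=1, 2,...
--
--     Parameters
--     ----------
--     num_ticks : int
--         The total number of ticks.
--     max_ticks : int
--         The maximum number of ticks to produce.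
--     include_upper : bool
--         Whether to include the upper limit in the produced ticks.
--     _accumulated_divisor : int
--         Internal variable to track the current order of the divisor in each recursion, should not be set manually.
--
--     Returns
--     -------
--     List[int]
--         The resulting ticks.
--     """
--     divisors = [1, 2, 5]
--     for divisor in divisors:
--         divisor *= _accumulated_divisor
--         if num_ticks // divisor <= max_ticks:
--             return list(range(0, num_ticks + include_upper * divisor, divisor))
--     return ticks(num_ticks, max_ticks, include_upper, _accumulated_divisor * 10)
-- ===== SOURCE B (Python) =====
-- def ticks(
--     num_ticks: int,
--     max_ticks: int = 10,
--     include_upper: bool = False,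
--     _accumulated_divisor: int = 1,
-- ):
--     # Single flat loop over the candidate step sizes 1,2,5,10,20,50,... (times
--     # _accumulated_divisor); candidate k is [1,2,5][k % 3] * 10**(k // 3).
--     k = 0
--     while True:
--         divisor = (1, 2, 5)[k % 3] * _accumulated_divisor * 10 ** (k // 3)
--         if num_ticks // divisor <= max_ticks:
--             return list(range(0, num_ticks + include_upper * divisor, divisor))
--         k += 1
-- ===== Notes on version B (the rewrite author's own statement) =====
-- stated objective: alternative
-- what changed: Replaced A's tail recursion (recursive call multiplying the divisor by 10, with an inner for-loop over [1,2,5]) by a single flat while-loop over one candidate index k whose divisor is computed directly as [1,2,5][k%3] * _accumulated_divisor * 10**(k//3).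
import Mathlib
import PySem

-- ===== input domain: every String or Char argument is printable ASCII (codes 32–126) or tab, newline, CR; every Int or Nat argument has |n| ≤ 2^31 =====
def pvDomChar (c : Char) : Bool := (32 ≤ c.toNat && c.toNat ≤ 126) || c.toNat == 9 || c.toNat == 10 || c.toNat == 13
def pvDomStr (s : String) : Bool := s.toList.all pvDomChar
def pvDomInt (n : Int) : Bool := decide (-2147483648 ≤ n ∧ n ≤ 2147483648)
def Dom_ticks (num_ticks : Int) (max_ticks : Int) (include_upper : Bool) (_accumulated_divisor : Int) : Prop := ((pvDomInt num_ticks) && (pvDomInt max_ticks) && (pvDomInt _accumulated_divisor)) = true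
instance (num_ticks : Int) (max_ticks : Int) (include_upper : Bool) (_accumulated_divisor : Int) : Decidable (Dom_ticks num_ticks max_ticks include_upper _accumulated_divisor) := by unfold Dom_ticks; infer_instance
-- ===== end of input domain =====

-- B replaces A's tail recursion (outer recursive call ×10 with an inner for over [1,2,5])
-- by one flat loop over a single candidate index k with divisor [1,2,5][k%3]*10^(k/3);
-- objective: alternative decomposition, same cost.

-- ===== PORT A =====
-- A's recursion: fuel makes the recursion a total Lean function; on inputs satisfying
-- Pre_ticks the Python returns within far fewer than 64 recursive calls (divisor grows
-- ×10 each call and |arguments| ≤ 2^31 on Dom), so the fuel is never exhausted there.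
def ticksAux (num_ticks : Int) (max_ticks : Int) (include_upper : Bool) : Nat → Int → List Int
  | 0, _ => []
  | fuel+1, acc =>
    -- for divisor in [1, 2, 5]: divisor *= _accumulated_divisor; if num_ticks // divisor <= max_ticks: return ...
    if PySem.Int.floordiv num_ticks (1 * acc) ≤ max_ticks then
      PySem.List.pyRange 0 (num_ticks + (if include_upper then (1:Int) else 0) * (1 * acc)) (1 * acc)
    else if PySem.Int.floordiv num_ticks (2 * acc) ≤ max_ticks then
      PySem.List.pyRange 0 (num_ticks + (if include_upper then (1:Int) else 0) * (2 * acc)) (2 * acc)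
    else if PySem.Int.floordiv num_ticks (5 * acc) ≤ max_ticks then
      PySem.List.pyRange 0 (num_ticks + (if include_upper then (1:Int) else 0) * (5 * acc)) (5 * acc)
    else
      ticksAux num_ticks max_ticks include_upper fuel (acc * 10)

def ticks (num_ticks : Int) (max_ticks : Int) (include_upper : Bool) (_accumulated_divisor : Int) : List Int :=
  ticksAux num_ticks max_ticks include_upper 64 _accumulated_divisor

-- ===== PORT B =====
-- B's single while-loop over the candidate index k (fuel 192 = 3 · 64, same remark as above).
def ticksLoop (num_ticks : Int) (max_ticks : Int) (include_upper : Bool) (acc0 : Int) : Nat → Nat → List Int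
  | 0, _ => []
  | fuel+1, k =>
    let divisor := [1, 2, 5].getD (k % 3) 0 * acc0 * 10 ^ (k / 3)
    if PySem.Int.floordiv num_ticks divisor ≤ max_ticks then
      PySem.List.pyRange 0 (num_ticks + (if include_upper then (1:Int) else 0) * divisor) divisor
    else
      ticksLoop num_ticks max_ticks include_upper acc0 fuel (k + 1)

def ticks_alt (num_ticks : Int) (max_ticks : Int) (include_upper : Bool) (_accumulated_divisor : Int) : List Int :=
  ticksLoop num_ticks max_ticks include_upper _accumulated_divisor 192 0

-- ===== PRECONDITION & SPEC =====
-- Pre_ticks excludes exactly the inputs on which the Python A raises: ZeroDivisionError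
-- when _accumulated_divisor = 0, and RecursionError (unbounded recursion) when no
-- candidate divisor ever satisfies the test — i.e. when the quotients are nonnegative
-- (num_ticks and _accumulated_divisor of equal sign) but max_ticks < 0, or when they are
-- negative (opposite signs) and already the first, most negative quotient exceeds max_ticks.
def Pre_ticks (num_ticks : Int) (max_ticks : Int) (include_upper : Bool) (_accumulated_divisor : Int) : Prop :=
  _accumulated_divisor ≠ 0 ∧
  (0 ≤ num_ticks * _accumulated_divisor → 0 ≤ max_ticks) ∧
  (num_ticks * _accumulated_divisor < 0 →
    (if 0 < _accumulated_divisor then num_ticks < (max_ticks + 1) * _accumulated_divisor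
     else (max_ticks + 1) * _accumulated_divisor < num_ticks))
instance (num_ticks : Int) (max_ticks : Int) (include_upper : Bool) (_accumulated_divisor : Int) : Decidable (Pre_ticks num_ticks max_ticks include_upper _accumulated_divisor) := by unfold Pre_ticks; infer_instance

def pvWitness_ticks : Int × Int × Bool × Int := (100, 10, true, 1)

def Spec_ticks (num_ticks : Int) (max_ticks : Int) (include_upper : Bool) (_accumulated_divisor : Int) (out : List Int) : Prop := out = ticks_alt num_ticks max_ticks include_upper _accumulated_divisor
instance (num_ticks : Int) (max_ticks : Int) (include_upper : Bool) (_accumulated_divisor : Int) (out : List Int) : Decidable (Spec_ticks num_ticks max_ticks include_upper _accumulated_divisor out) := by unfold Spec_ticks; infer_instance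

-- ===== CLAIM (what is proved, stated in full; the proofs are below) =====
def Claim_equal_ticks : Prop := ∀ (num_ticks : Int) (max_ticks : Int) (include_upper : Bool) (_accumulated_divisor : Int), Dom_ticks num_ticks max_ticks include_upper _accumulated_divisor → Pre_ticks num_ticks max_ticks include_upper _accumulated_divisor → Spec_ticks num_ticks max_ticks include_upper _accumulated_divisor (ticks num_ticks max_ticks include_upper _accumulated_divisor)

-- ===== LEMMAS AND PROOFS =====

-- The two fuelled loops walk the same candidate sequence: A's recursion level j with
-- accumulated divisor a·10^j corresponds to B's indices k = 3j, 3j+1, 3j+2.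
theorem ticks_bridge (n m : Int) (u : Bool) (a : Int) :
    ∀ (f j : Nat), ticksAux n m u f (a * 10 ^ j) = ticksLoop n m u a (3 * f) (3 * j) := by
  intro f
  induction f with
  | zero => intro j; simp [ticksAux, ticksLoop]
  | succ f ih =>
    intro j
    have e : 3 * (f + 1) = 3 * f + 1 + 1 + 1 := by ring
    rw [e]
    simp only [ticksAux, ticksLoop]
    have h0m : (3 * j) % 3 = 0 := by omega
    have h0d : (3 * j) / 3 = j := by omega
    have h1m : (3 * j + 1) % 3 = 1 := by omega
    have h1d : (3 * j + 1) / 3 = j := by omega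
    have h2m : (3 * j + 1 + 1) % 3 = 2 := by omega
    have h2d : (3 * j + 1 + 1) / 3 = j := by omega
    simp only [h0m, h0d, h1m, h1d, h2m, h2d, List.getD]
    have k3 : 3 * j + 1 + 1 + 1 = 3 * (j + 1) := by ring
    have a3 : a * 10 ^ j * 10 = a * 10 ^ (j + 1) := by ring
    rw [k3, a3, ih (j + 1)]
    norm_num [mul_assoc]

-- ===== VERDICT (by name: the statement is the Claim_ definition above) =====
theorem ticks_spec : Claim_equal_ticks := by
  intro n m u a _ _
  unfold Spec_ticks ticks ticks_alt
  have h := ticks_bridge n m u a 64 0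
  simpa using h
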